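-- pv_equiv track=rewrite | github.com/dranhclub/Truck-drone-tandem-delivery-network | tspd_mfea_pkg/tspd_mfea.py | fix_color
-- ===== SOURCE A (Python) =====
-- def fix_color(arr):
--     red = "R"
--     green = "G"
--     black = " "
--     count = 0
--     for i in arr:
--         if i == red or i == green:
--             count += 1
--     if count < 3:
--         return [black] * len(arr)
--
--     for i in range(len(arr) - 1, -1, -1):
--         if arr[i] == green:
--             arr[i] = black
--             for j in range(i - 1, -1, -1):
--                 if arr[j] == red:
--                     for k in range(j - 1, -1, -1):
--                         if arr[k] == red:
--                             arr[j] = black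
--                             return arr
--                         elif arr[k] == green:
--                             return arr
--             return arr
--         elif arr[i] == red:
--             for j in range(i - 1, -1, -1):
--                 if arr[j] == red:
--                     arr[i] = black
--                     return arr
--                 elif arr[j] == green:
--                     return arr
--     return arr
-- ===== SOURCE B (Python) =====
-- def fix_color(arr):
--     black = " "
--     cols = [(i, c) for i, c in enumerate(arr) if c in ("R", "G")]
--     if len(cols) < 3:
--         return [black] * len(arr)
--     li, lc = cols[-1]
--     if lc == "G":
--         arr[li] = black
--         rest = cols[:-1]
--         rest.reverse()
--         for p in range(len(rest)):
--             if rest[p][1] == "R":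
--                 if p + 1 < len(rest) and rest[p + 1][1] == "R":
--                     arr[rest[p][0]] = black
--                 break
--     elif cols[-2][1] == "R":
--         arr[li] = black
--     return arr
-- ===== Notes on version B (the rewrite author's own statement) =====
-- stated objective: simpler
-- what changed: B precomputes the list of colored cells (index, color) once and decides everything by looking at the tail of that list, replacing A's three nested backward array scans; both mutate arr in place identically.
import Mathlib
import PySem

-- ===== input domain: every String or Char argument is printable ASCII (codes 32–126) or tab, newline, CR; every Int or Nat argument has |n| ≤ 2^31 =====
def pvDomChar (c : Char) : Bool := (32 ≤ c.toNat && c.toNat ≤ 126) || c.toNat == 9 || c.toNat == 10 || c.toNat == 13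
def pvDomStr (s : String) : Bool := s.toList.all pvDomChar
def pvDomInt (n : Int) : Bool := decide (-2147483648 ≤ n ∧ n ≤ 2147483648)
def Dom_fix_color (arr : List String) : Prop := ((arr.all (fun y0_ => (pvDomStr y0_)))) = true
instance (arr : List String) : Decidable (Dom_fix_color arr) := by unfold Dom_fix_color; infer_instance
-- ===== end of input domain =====

-- B replaces A's nested backward array scans by one precomputed list of colored cells (simpler);
-- both A and B mutate arr in place identically in Python, the proof is about the return value.

-- ===== PORT A =====
-- backward scan 'for x in range(t-1, -1, -1): if arr[x]==R … elif ==G …' used twice in A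
-- (the j-loop of the red branch and the k-loop of the green branch are the same code);
-- returns some result on 'return arr', none when the loop falls through.
def fixScanBelow (arr : List String) (tgt : Nat) : Nat → Option (List String)
  | 0 => none
  | t + 1 =>
    if arr.getD t "" == "R" then some (arr.set tgt " ")
    else if arr.getD t "" == "G" then some arr
    else fixScanBelow arr tgt t

-- the j-loop of A's green branch: find red below, then look further below it
def fixLoopJG (arr : List String) : Nat → List String
  | 0 => arr
  | j + 1 =>
    if arr.getD j "" == "R" then
      match fixScanBelow arr j j with
      | some r => r
      | none => fixLoopJG arr j
    else fixLoopJG arr j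

-- A's outer i-loop
def fixLoopI (arr : List String) : Nat → List String
  | 0 => arr
  | i + 1 =>
    if arr.getD i "" == "G" then
      fixLoopJG (arr.set i " ") i
    else if arr.getD i "" == "R" then
      match fixScanBelow arr i i with
      | some r => r
      | none => fixLoopI arr i
    else fixLoopI arr i

def fix_color (arr : List String) : List String :=
  let count : Int := arr.foldl (fun c s => if s == "R" || s == "G" then c + 1 else c) 0
  if count < 3 then List.replicate arr.length " "
  else fixLoopI arr arr.length

-- ===== PORT B =====
-- the backward for-loop over 'rest' with its one-ahead peek rest[p+1]
def fixScanRed : List (Int × String) → Option Int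
  | [] => none
  | (j, c) :: rest =>
    if c == "R" then
      (if (match rest with | (_, c2) :: _ => c2 == "R" | [] => false) then some j else none)
    else fixScanRed rest

def fix_color_alt (arr : List String) : List String :=
  let cols := (PySem.List.enumerate arr).filter (fun p => p.2 == "R" || p.2 == "G")
  if cols.length < 3 then List.replicate arr.length " "
  else
    let last := cols.getLast?.getD (0, "")
    if last.2 == "G" then
      let arr1 := PySem.List.pySetD arr last.1 " "
      let rest := cols.dropLast.reverse
      match fixScanRed rest with
      | some j => PySem.List.pySetD arr1 j " "
      | none => arr1
    else if ((cols.dropLast.getLast?.getD (0, "")).2 == "R") then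
      PySem.List.pySetD arr last.1 " "
    else arr

-- ===== PRECONDITION & SPEC =====
def Spec_fix_color (arr : List String) (out : List String) : Prop := out = fix_color_alt arr
instance (arr : List String) (out : List String) : Decidable (Spec_fix_color arr out) := by unfold Spec_fix_color; infer_instance

-- ===== CLAIM (what is proved, stated in full; the proofs are below) =====
def Claim_equal_fix_color : Prop := ∀ (arr : List String), Dom_fix_color arr → Spec_fix_color arr (fix_color arr)

-- ===== LEMMAS AND PROOFS =====

-- the colored cells among indices < t, in index order, with Int indices as in B's port
def fixCols (arr : List String) (t : Nat) : List (Int × String) :=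
  ((List.range t).map (fun k => (((k : Nat) : Int), arr.getD k ""))).filter (fun p => p.2 == "R" || p.2 == "G")

theorem fixCols_succ (arr : List String) (t : Nat) :
    fixCols arr (t + 1) =
      fixCols arr t ++ (if arr[t]?.getD "" = "R" ∨ arr[t]?.getD "" = "G"
        then [((t : Int), arr[t]?.getD "")] else []) := by
  unfold fixCols
  rw [List.range_succ, List.map_append, List.filter_append]
  congr 1
  by_cases h1 : arr[t]?.getD "" = "R"
  · simp [List.getD, h1]
  · by_cases h2 : arr[t]?.getD "" = "G" <;> simp [List.getD, h1, h2]

theorem fixCols_set_ge (arr : List String) (x : String) (t i : Nat) (h : t ≤ i) :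
    fixCols (arr.set i x) t = fixCols arr t := by
  unfold fixCols
  congr 1
  apply List.map_congr_left
  intro k hk
  simp only [List.mem_range] at hk
  rw [List.getD, List.getD, List.getElem?_set_ne (by omega)]

theorem fixCols_colored (arr : List String) (t : Nat) (p : Int × String)
    (hp : p ∈ fixCols arr t) : p.2 = "R" ∨ p.2 = "G" := by
  have := (List.mem_filter.mp hp).2
  rw [Bool.or_eq_true, beq_iff_eq, beq_iff_eq] at this
  exact this

theorem fixCols_fst_nonneg (arr : List String) (t : Nat) (p : Int × String)
    (hp : p ∈ fixCols arr t) : 0 ≤ p.1 := by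
  unfold fixCols at hp
  simp only [List.mem_filter, List.mem_map, List.mem_range] at hp
  obtain ⟨⟨k, _, hk⟩, _⟩ := hp
  cases hk; simp

-- characterisation of the shared backward scan in terms of the colored list
theorem fixScanBelow_spec (arr : List String) (tgt t : Nat) :
    fixScanBelow arr tgt t =
      match (fixCols arr t).reverse with
      | [] => none
      | (_, c) :: _ => if c == "R" then some (arr.set tgt " ") else some arr := by
  induction t with
  | zero => simp [fixScanBelow, fixCols]
  | succ t ih =>
    rw [fixScanBelow, fixCols_succ]
    by_cases hR : arr[t]?.getD "" = "R"
    · simp [List.getD, hR]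
    · by_cases hG : arr[t]?.getD "" = "G"
      · simp [List.getD, hR, hG]
      · simp [List.getD, hR, hG, ih]

-- characterisation of the green-branch j-loop in terms of B's fixScanRed
theorem fixLoopJG_spec (arr : List String) (t : Nat) :
    fixLoopJG arr t =
      match fixScanRed (fixCols arr t).reverse with
      | some j => arr.set j.toNat " "
      | none => arr := by
  induction t with
  | zero => simp [fixLoopJG, fixCols, fixScanRed]
  | succ t ih =>
    rw [fixLoopJG, fixCols_succ]
    by_cases hR : arr[t]?.getD "" = "R"
    · rw [fixScanBelow_spec]
      cases hrc : (fixCols arr t).reverse with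
      | nil =>
        simp [List.getD, hR, hrc, fixScanRed, ih]
      | cons hd tl =>
        obtain ⟨k, c⟩ := hd
        have hcol : c = "R" ∨ c = "G" :=
          fixCols_colored arr t (k, c) (by rw [← List.mem_reverse, hrc]; exact List.mem_cons_self)
        rcases hcol with hc | hc <;>
          simp [List.getD, hR, hrc, hc, fixScanRed, ih]
    · by_cases hG : arr[t]?.getD "" = "G"
      · simp [List.getD, hR, hG, fixScanRed, ih]
      · simp [List.getD, hR, hG, ih]

-- the common right-hand shape both programs reduce to
def fixProc (arr : List String) (rc : List (Int × String)) : List String :=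
  match rc with
  | [] => arr
  | (i, c) :: rest =>
    if c == "R" then
      match rest with
      | (_, c2) :: _ => if c2 == "R" then arr.set i.toNat " " else arr
      | [] => arr
    else
      match fixScanRed rest with
      | some j => (arr.set i.toNat " ").set j.toNat " "
      | none => arr.set i.toNat " "

theorem fixLoopI_spec (arr : List String) (t : Nat) :
    fixLoopI arr t = fixProc arr (fixCols arr t).reverse := by
  induction t with
  | zero => simp [fixLoopI, fixCols, fixProc]
  | succ t ih =>
    rw [fixLoopI, fixCols_succ]
    by_cases hG : arr[t]?.getD "" = "G"
    · have hR : ¬ arr[t]?.getD "" = "R" := by simp [hG]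
      rw [fixLoopJG_spec, fixCols_set_ge arr " " t t (le_refl t)]
      simp [List.getD, hR, hG, fixProc]
    · by_cases hR : arr[t]?.getD "" = "R"
      · rw [fixScanBelow_spec]
        cases hrc : (fixCols arr t).reverse with
        | nil =>
          simp [List.getD, hR, hG, hrc, fixProc, ih]
        | cons hd tl =>
          obtain ⟨k, c⟩ := hd
          have hcol : c = "R" ∨ c = "G" :=
            fixCols_colored arr t (k, c) (by rw [← List.mem_reverse, hrc]; exact List.mem_cons_self)
          rcases hcol with hc | hc <;>
            simp [List.getD, hR, hG, hrc, hc, fixProc, ih]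
      · simp [List.getD, hR, hG, ih]

-- A's counting fold equals the length of the colored list
theorem fixCount_aux (arr : List String) (c0 : Int) :
    arr.foldl (fun c s => if s == "R" || s == "G" then c + 1 else c) c0
      = c0 + (arr.filter (fun s => s == "R" || s == "G")).length := by
  induction arr generalizing c0 with
  | nil => simp
  | cons x xs ih =>
    simp only [List.foldl_cons]
    by_cases hx : (x == "R" || x == "G") = true
    · rw [if_pos hx, ih]
      simp [List.filter_cons, hx]
      omega
    · rw [if_neg hx, ih]
      simp [List.filter_cons, hx]

theorem fixCols_length (arr : List String) :
    (fixCols arr arr.length).length = (arr.filter (fun s => s == "R" || s == "G")).length := by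
  induction arr using List.reverseRecOn with
  | nil => simp [fixCols]
  | append_singleton xs x ih =>
    have h1 : fixCols (xs ++ [x]) xs.length = fixCols xs xs.length := by
      unfold fixCols
      congr 1
      apply List.map_congr_left
      intro k hk
      simp only [List.mem_range] at hk
      rw [List.getD, List.getD, List.getElem?_append_left hk]
    have hx : (xs ++ [x])[xs.length]?.getD "" = x := by
      rw [List.getElem?_append_right (le_refl _)]
      simp
    rw [List.length_append, List.length_singleton, fixCols_succ, List.filter_append, h1, hx]
    simp only [List.length_append, ih]
    by_cases hr : x = "R"
    · simp [hr]
    · by_cases hg : x = "G" <;> simp [hr, hg]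

-- B's cols equals fixCols over the whole array
theorem fix_cols_eq (arr : List String) :
    (PySem.List.enumerate arr).filter (fun p => p.2 == "R" || p.2 == "G")
      = fixCols arr arr.length := by
  rw [PySem.List.enumerate_eq_map_pyRange arr ""]
  unfold fixCols
  congr 1
  rw [PySem.List.pyRange_one]
  simp [Function.comp_def]

-- fixScanRed only returns indices that occur in its input list
theorem fixScanRed_mem (l : List (Int × String)) (j : Int)
    (h : fixScanRed l = some j) : ∃ c, (j, c) ∈ l := by
  induction l with
  | nil => simp [fixScanRed] at h
  | cons hd tl ih =>
    obtain ⟨k, c⟩ := hd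
    simp only [fixScanRed] at h
    by_cases hc : (c == "R") = true
    · rw [if_pos hc] at h
      split_ifs at h
      · obtain rfl : k = j := by simpa using h
        exact ⟨c, List.mem_cons_self⟩
    · rw [if_neg hc] at h
      obtain ⟨c', hc'⟩ := ih h
      exact ⟨c', List.mem_cons_of_mem _ hc'⟩

-- ===== VERDICT (by name: the statement is the Claim_ definition above) =====
theorem fix_color_spec : Claim_equal_fix_color := by
  intro arr _
  unfold Spec_fix_color fix_color fix_color_alt
  simp only [fix_cols_eq]
  rw [fixCount_aux]
  simp only [Int.zero_add]
  by_cases hlt : ((arr.filter (fun s => s == "R" || s == "G")).length : Int) < 3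
  · have h2 : (fixCols arr arr.length).length < 3 := by
      rw [fixCols_length]; exact_mod_cast hlt
    simp [hlt, h2]
  · have hge : ¬ (fixCols arr arr.length).length < 3 := by
      rw [fixCols_length]; intro h; exact hlt (by exact_mod_cast h)
    simp only [hlt, if_false, hge]
    rw [fixLoopI_spec arr arr.length]
    have hne : fixCols arr arr.length ≠ [] := by
      intro h; rw [h] at hge; simp at hge
    obtain ⟨l, p, hsplit⟩ : ∃ l p, fixCols arr arr.length = l ++ [p] := by
      rcases List.eq_nil_or_concat (fixCols arr arr.length) with h | ⟨l, p, h⟩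
      · exact absurd h hne
      · exact ⟨l, p, by simpa using h⟩
    obtain ⟨li, lc⟩ := p
    have hcol : lc = "R" ∨ lc = "G" :=
      fixCols_colored arr arr.length (li, lc) (by rw [hsplit]; simp)
    have hli : 0 ≤ li :=
      fixCols_fst_nonneg arr arr.length (li, lc) (by rw [hsplit]; simp)
    rw [hsplit]
    simp only [List.reverse_append, List.reverse_singleton, List.singleton_append,
      List.dropLast_concat, List.getLast?_concat, Option.getD_some]
    rcases hcol with hr | hg
    · -- last colored cell is red
      simp only [fixProc, hr, beq_self_eq_true, if_true]
      have hRG : (("R" : String) == "G") = false := by decide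
      simp only [hRG, Bool.false_eq_true, if_false]
      cases hl : l.reverse with
      | nil =>
        have : l = [] := by simpa using congrArg List.reverse hl
        rw [this] at hsplit
        rw [hsplit] at hge
        simp at hge
      | cons hd tl =>
        obtain ⟨k, c2⟩ := hd
        have hlast : l.getLast? = some (k, c2) := by
          rw [← List.head?_reverse, hl]; rfl
        simp only [hlast, Option.getD_some]
        by_cases hc2 : c2 = "R"
        · simp [hc2, PySem.List.pySetD_of_nonneg arr " " hli]
        · have hc2' : (c2 == "R") = false := by simp [hc2]
          simp [hc2']
    · -- last colored cell is green
      have hGR : (("G" : String) == "R") = false := by decide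
      simp only [fixProc, hg, hGR, Bool.false_eq_true, if_false, beq_self_eq_true, if_true]
      cases hs : fixScanRed l.reverse with
      | none => simp [PySem.List.pySetD_of_nonneg arr " " hli]
      | some j =>
        have hj : 0 ≤ j := by
          obtain ⟨c, hc⟩ := fixScanRed_mem l.reverse j hs
          rw [List.mem_reverse] at hc
          exact fixCols_fst_nonneg arr arr.length (j, c)
            (by rw [hsplit]; exact List.mem_append_left _ hc)
        simp [PySem.List.pySetD_of_nonneg _ " " hj,
          PySem.List.pySetD_of_nonneg arr " " hli]
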